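-- pv_equiv track=rewrite | github.com/Sw1ft435/InternshipFinder | notify_canada_interns.py | extract_first_markdown_table
-- ===== SOURCE A (Python) =====
-- from typing import List, Dict, Optional
--
-- def extract_first_markdown_table(section_md: str) -> Optional[List[str]]:
--     lines = section_md.splitlines()
--     table_lines = []
--     in_table = False
--     for line in lines:
--         if line.strip().startswith("|"):
--             in_table = True
--             table_lines.append(line.rstrip())
--         elif in_table:
--             break
--     return table_lines or None
-- ===== SOURCE B (Python) =====
-- from typing import List, Optional
--
-- def extract_first_markdown_table(section_md: str) -> Optional[List[str]]:
--     lines = section_md.splitlines()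
--     # group the lines into maximal runs of equal "table-line" status
--     runs = []
--     i = 0
--     while i < len(lines):
--         key = lines[i].strip().startswith("|")
--         j = i + 1
--         while j < len(lines) and lines[j].strip().startswith("|") == key:
--             j += 1
--         runs.append((key, lines[i:j]))
--         i = j
--     # the answer is the first run of table lines, rstripped
--     for key, run in runs:
--         if key:
--             return [l.rstrip() for l in run]
--     return None
-- ===== Notes on version B (the rewrite author's own statement) =====
-- stated objective: alternative
-- what changed: Instead of a flag-driven scan with break, B run-length-groups the lines into maximal runs of equal table-line status and returns the first run whose key is True, rstripped.
import Mathlib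
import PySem

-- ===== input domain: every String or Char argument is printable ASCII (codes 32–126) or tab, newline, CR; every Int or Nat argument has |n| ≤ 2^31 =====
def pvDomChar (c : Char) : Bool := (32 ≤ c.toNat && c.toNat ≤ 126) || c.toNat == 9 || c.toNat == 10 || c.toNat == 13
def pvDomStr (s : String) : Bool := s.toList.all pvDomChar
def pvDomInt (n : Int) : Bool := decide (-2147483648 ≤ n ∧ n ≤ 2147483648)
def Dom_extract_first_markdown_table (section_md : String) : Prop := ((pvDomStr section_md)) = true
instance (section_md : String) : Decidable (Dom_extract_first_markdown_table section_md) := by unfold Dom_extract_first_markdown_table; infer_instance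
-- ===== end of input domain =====

-- B replaces A's flag-and-break scan by run-length grouping of the lines and selecting the first table run (alternative decomposition; same cost).


-- ===== PORT A =====
-- the loop with break, as structural recursion over (table_lines, in_table)
def pvGoA : List String → List String → Bool → List String
  | [], acc, _ => acc
  | l :: rest, acc, inTable =>
    if PySem.Str.startswith (PySem.Str.strip l) "|" then
      pvGoA rest (acc ++ [PySem.Str.rstrip l]) true
    else if inTable then acc
    else pvGoA rest acc inTable

def extract_first_markdown_table (section_md : String) : Option (List String) :=
  let lines := PySem.Str.splitlines section_md
  let table_lines := pvGoA lines [] false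
  if table_lines = [] then none else some table_lines

-- ===== PORT B =====
def pvIsTable (l : String) : Bool := PySem.Str.startswith (PySem.Str.strip l) "|"

-- the outer while loop of B: peel one maximal run of equal key off the front
-- (the inner while loop advancing j and the slices lines[i:j]/lines[j:] are takeWhile/dropWhile on the same predicate)
def pvRuns : List String → List (Bool × List String)
  | [] => []
  | l :: rest =>
    let key := pvIsTable l
    (key, l :: rest.takeWhile (fun x => pvIsTable x == key)) ::
      pvRuns (rest.dropWhile (fun x => pvIsTable x == key))
termination_by l => l.length
decreasing_by
  have := List.length_dropWhile_le (fun x => pvIsTable x == pvIsTable l) rest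
  simp only [List.length_cons]
  omega

-- B's selection loop: first run with key = true, rstripped
def pvFirstTable : List (Bool × List String) → Option (List String)
  | [] => none
  | (key, run) :: rest =>
    if key then some (run.map PySem.Str.rstrip) else pvFirstTable rest

def extract_first_markdown_table_alt (section_md : String) : Option (List String) :=
  pvFirstTable (pvRuns (PySem.Str.splitlines section_md))

-- ===== PRECONDITION & SPEC =====
def Spec_extract_first_markdown_table (section_md : String) (out : Option (List String)) : Prop := out = extract_first_markdown_table_alt section_md
instance (section_md : String) (out : Option (List String)) : Decidable (Spec_extract_first_markdown_table section_md out) := by unfold Spec_extract_first_markdown_table; infer_instance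

-- ===== CLAIM (what is proved, stated in full; the proofs are below) =====
def Claim_equal_extract_first_markdown_table : Prop := ∀ (section_md : String), Dom_extract_first_markdown_table section_md → Spec_extract_first_markdown_table section_md (extract_first_markdown_table section_md)

-- ===== LEMMAS AND PROOFS =====

theorem pvGoA_eqn (l : String) (rest acc : List String) (inTable : Bool) :
    pvGoA (l :: rest) acc inTable =
      if pvIsTable l then pvGoA rest (acc ++ [PySem.Str.rstrip l]) true
      else if inTable then acc else pvGoA rest acc inTable := rfl

theorem pvGoA_true (lines : List String) : ∀ acc,
    pvGoA lines acc true = acc ++ (lines.takeWhile pvIsTable).map PySem.Str.rstrip := by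
  induction lines with
  | nil => simp [pvGoA]
  | cons l rest ih =>
    intro acc
    rw [pvGoA_eqn]
    by_cases h : pvIsTable l = true
    · rw [if_pos h, ih, List.takeWhile_cons_of_pos h]
      simp
    · rw [if_neg h, if_pos rfl, List.takeWhile_cons_of_neg (by simpa using h)]
      simp

theorem pvGoA_false (lines : List String) : ∀ acc,
    pvGoA lines acc false =
      acc ++ ((lines.dropWhile (fun l => !pvIsTable l)).takeWhile pvIsTable).map PySem.Str.rstrip := by
  induction lines with
  | nil => simp [pvGoA]
  | cons l rest ih =>
    intro acc
    rw [pvGoA_eqn]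
    by_cases h : pvIsTable l = true
    · rw [if_pos h, List.dropWhile_cons_of_neg (by simpa using h),
        List.takeWhile_cons_of_pos h, pvGoA_true]
      simp
    · rw [if_neg h, if_neg (by simp), List.dropWhile_cons_of_pos (by simpa using h)]
      exact ih acc

theorem dropWhile_idem {α : Type} (p : α → Bool) (l : List α) :
    (l.dropWhile p).dropWhile p = l.dropWhile p := by
  induction l with
  | nil => rfl
  | cons a rest ih =>
    by_cases h : p a = true
    · rw [List.dropWhile_cons_of_pos h]; exact ih
    · rw [List.dropWhile_cons_of_neg (by simpa using h),
        List.dropWhile_cons_of_neg (by simpa using h)]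

-- B's result equals the canonical dropWhile/takeWhile form
theorem pvFirstTable_runs (lines : List String) :
    pvFirstTable (pvRuns lines) =
      (fun t => if t = [] then none else some t)
        (((lines.dropWhile (fun l => !pvIsTable l)).takeWhile pvIsTable).map PySem.Str.rstrip) := by
  induction lines using pvRuns.induct with
  | case1 => simp [pvRuns, pvFirstTable]
  | case2 l rest key ih =>
    have hk : key = pvIsTable l := rfl
    rw [pvRuns]
    by_cases h : pvIsTable l = true
    · rw [List.dropWhile_cons_of_neg (by simpa using h), List.takeWhile_cons_of_pos h]
      simp only [pvFirstTable, h]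
      simp
    · simp only [pvFirstTable, hk, if_neg h]
      rw [List.dropWhile_cons_of_pos (by simpa using h)]
      have hq : (fun x => pvIsTable x == pvIsTable l) = (fun x => !pvIsTable x) := by
        funext x
        rw [Bool.not_eq_true] at h
        rw [h]
        cases pvIsTable x <;> rfl
      rw [hk, hq] at ih
      rw [hq, ih, dropWhile_idem]

-- ===== VERDICT (by name: the statement is the Claim_ definition above) =====
theorem extract_first_markdown_table_spec : Claim_equal_extract_first_markdown_table := by
  intro s _
  unfold Spec_extract_first_markdown_table extract_first_markdown_table extract_first_markdown_table_alt
  rw [pvFirstTable_runs]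
  simp [pvGoA_false]
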